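-- pv_equiv track=rewrite | github.com/KillianDeGeest1999/random_scripts | concatenator2.py | concatenate_sequences
-- ===== SOURCE A (Python) =====
-- def concatenate_sequences(sorted_multifasta):
--     """
--     Concatenates sequences based on the order of genes and headers.
--     """
--     # Define the order of genes
--     order = ["PB2", "PB1", "PA", "HA", "NP", "NA", "MP", "NS"]
--     concatenated_multifasta = {}
--     for gene in order:
--         # Iterate over each gene in the specified order
--         if gene in sorted_multifasta:
--             for header_prefix, sequence in sorted_multifasta[gene].items():
--                 # Create a dictionary to store concatenated sequences for each header prefix
--                 if header_prefix not in concatenated_multifasta: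
--                     concatenated_multifasta[header_prefix] = []
--                 concatenated_multifasta[header_prefix].extend(sequence)
--     return concatenated_multifasta
-- ===== SOURCE B (Python) =====
-- def concatenate_sequences(sorted_multifasta):
--     """
--     Concatenates sequences based on the order of genes and headers.
--     Two-pass version: flatten all (header_prefix, sequence) pairs in gene
--     order, take the header prefixes in first-appearance order, then build
--     each prefix's concatenation by gathering its sequences from the pairs.
--     """
--     order = ["PB2", "PB1", "PA", "HA", "NP", "NA", "MP", "NS"]
--     pairs = [pair for gene in order if gene in sorted_multifasta
--              for pair in sorted_multifasta[gene].items()]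
--     prefixes = dict.fromkeys(hp for hp, _ in pairs)
--     return {hp: [s for hp2, seq in pairs if hp2 == hp for s in seq]
--             for hp in prefixes}
-- ===== Notes on version B (the rewrite author's own statement) =====
-- stated objective: alternative
-- what changed: Replaces the single interleaved pass that mutates a dict entry-by-entry with a two-pass aggregation: flatten all (prefix, sequence) pairs in gene order, dedup the prefixes in first-appearance order, then build each prefix's concatenated list by a per-prefix gather over the flattened pairs.
import Mathlib
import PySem

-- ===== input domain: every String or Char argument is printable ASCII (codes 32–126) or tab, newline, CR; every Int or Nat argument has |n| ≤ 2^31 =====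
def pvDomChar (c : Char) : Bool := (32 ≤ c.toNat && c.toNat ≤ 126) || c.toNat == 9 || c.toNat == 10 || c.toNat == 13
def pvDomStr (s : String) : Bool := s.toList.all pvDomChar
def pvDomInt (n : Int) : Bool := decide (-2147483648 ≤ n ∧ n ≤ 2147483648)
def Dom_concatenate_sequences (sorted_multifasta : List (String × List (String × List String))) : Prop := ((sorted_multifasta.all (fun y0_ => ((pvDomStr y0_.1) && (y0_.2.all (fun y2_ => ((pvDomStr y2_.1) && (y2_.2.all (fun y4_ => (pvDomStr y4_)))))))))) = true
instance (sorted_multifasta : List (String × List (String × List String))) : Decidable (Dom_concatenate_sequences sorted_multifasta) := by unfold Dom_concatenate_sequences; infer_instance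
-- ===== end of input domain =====

-- B replaces A's single interleaved dict-mutating pass with a two-pass aggregation
-- (flatten pairs in gene order, dedup prefixes, per-prefix gather); alternative, not faster.


-- the fixed gene order (shared constant of both Pythons)
def csOrder : List String := ["PB2", "PB1", "PA", "HA", "NP", "NA", "MP", "NS"]

-- ===== PORT A =====
-- one inner iteration of A: extend concatenated_multifasta[header_prefix] by sequence
-- (the 'if not in: … = []' + '.extend' is exactly Dict.modify with default [])
def csStep (acc : PySem.Dict String (List String)) (p : String × List String) :
    PySem.Dict String (List String) :=
  acc.modify p.1 [] (fun v => v ++ p.2)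

def concatenate_sequences (sorted_multifasta : List (String × List (String × List String))) : List (String × List String) :=
  (csOrder.foldl
    (fun acc gene =>
      match (PySem.Dict.mk sorted_multifasta).get? gene with
      | none => acc
      | some items => items.foldl csStep acc)
    PySem.Dict.empty).items

-- ===== PORT B =====
def concatenate_sequences_alt (sorted_multifasta : List (String × List (String × List String))) : List (String × List String) :=
  let pairs := csOrder.flatMap (fun gene => (PySem.Dict.mk sorted_multifasta).getD gene [])
  let prefixes := PySem.List.dedup (pairs.map Prod.fst)
  prefixes.map (fun hp => (hp, (pairs.filter (fun p => p.1 == hp)).flatMap (·.2)))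

-- ===== PRECONDITION & SPEC =====
def Spec_concatenate_sequences (sorted_multifasta : List (String × List (String × List String))) (out : List (String × List String)) : Prop := out = concatenate_sequences_alt sorted_multifasta
instance (sorted_multifasta : List (String × List (String × List String))) (out : List (String × List String)) : Decidable (Spec_concatenate_sequences sorted_multifasta out) := by unfold Spec_concatenate_sequences; infer_instance

-- ===== CLAIM (what is proved, stated in full; the proofs are below) =====
def Claim_equal_concatenate_sequences : Prop := ∀ (sorted_multifasta : List (String × List (String × List String))), Dom_concatenate_sequences sorted_multifasta → Spec_concatenate_sequences sorted_multifasta (concatenate_sequences sorted_multifasta)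

-- ===== LEMMAS AND PROOFS =====

-- A's per-gene branch is a fold over that gene's item list, [] when the gene is absent
lemma csGene_eq_getD (m : List (String × List (String × List String))) (g : String)
    (acc : PySem.Dict String (List String)) :
    (match (PySem.Dict.mk m).get? g with
      | none => acc
      | some items => items.foldl csStep acc)
    = ((PySem.Dict.mk m).getD g []).foldl csStep acc := by
  cases h : (PySem.Dict.mk m).get? g with
  | none => simp [PySem.Dict.getD_eq_get?_getD, h]
  | some items => simp [PySem.Dict.getD_eq_get?_getD, h]

-- the value at key c after folding the extend-step over a pair list
lemma getD_foldl_csStep (l : List (String × List String))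
    (d : PySem.Dict String (List String)) (c : String) :
    (l.foldl csStep d).getD c []
      = d.getD c [] ++ (l.filter (fun p => p.1 == c)).flatMap (·.2) := by
  induction l generalizing d with
  | nil => simp
  | cons p t ih =>
    simp only [List.foldl_cons, ih, List.filter_cons]
    by_cases h : p.1 = c
    · subst h
      simp [csStep, PySem.Dict.getD_modify_self]
    · have h' : c ≠ p.1 := fun hc => h hc.symm
      simp [csStep, PySem.Dict.getD_modify, h, h']

-- ===== VERDICT (by name: the statement is the Claim_ definition above) =====
theorem concatenate_sequences_spec : Claim_equal_concatenate_sequences := by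
  intro m _
  unfold Spec_concatenate_sequences concatenate_sequences concatenate_sequences_alt
  simp only [csGene_eq_getD]
  rw [show (csOrder.foldl (fun acc g => ((PySem.Dict.mk m).getD g []).foldl csStep acc)
        PySem.Dict.empty)
      = ((csOrder.flatMap (fun g => (PySem.Dict.mk m).getD g [])).foldl csStep
        PySem.Dict.empty) from (List.foldl_flatMap ..).symm]
  set pairs := csOrder.flatMap (fun g => (PySem.Dict.mk m).getD g []) with hp
  set D := pairs.foldl csStep PySem.Dict.empty with hD
  have hnd : D.keys.Nodup := by
    rw [hD]
    exact PySem.Dict.nodup_keys_foldl_modify_key pairs Prod.fst [] (fun _ p v => v ++ p.2)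
      PySem.Dict.empty PySem.Dict.nodup_keys_empty
  have hkeys : D.keys = PySem.List.dedup (pairs.map Prod.fst) := by
    rw [hD]
    rw [show (List.foldl csStep PySem.Dict.empty pairs)
        = (List.foldl (fun d x => d.modify x.1 [] fun v => v ++ x.2) PySem.Dict.empty pairs)
        from rfl,
      PySem.Dict.keys_foldl_modify_key pairs Prod.fst [] (fun _ p v => v ++ p.2)
        PySem.Dict.empty]
    simp [PySem.Set.update_nil_left]
  rw [PySem.Dict.items_eq_map_keys D hnd [], hkeys]
  refine List.map_congr_left (fun c _ => ?_)
  rw [hD, getD_foldl_csStep]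
  simp
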